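-- pv_equiv track=rewrite | github.com/axjasf/BMC-HotelRooms-Problem | webapp.py | calculate_value_groups
-- ===== SOURCE A (Python) =====
-- def f(n):
--     return n
--
-- def g(n):
--     return 3 * n + 1
--
-- def h(n):
--     return n + 81
--
-- def calculate_value_groups(max_n):
--     value_groups = []
--     group_counts = []
--     all_groups = []
--
--     for n in range(1, max_n + 1):
--         values = set([f(n), g(n), h(n)])
--
--         matching_groups = []
--         for i, group in enumerate(value_groups):
--             if group & values:
--                 matching_groups.append(i)
--
--         if matching_groups:
--             lowest_group_index = min(matching_groups)
--             value_groups[lowest_group_index].update(values)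
--             for i in sorted(matching_groups[1:], reverse=True):
--                 value_groups[lowest_group_index].update(value_groups[i])
--                 del value_groups[i]
--         else:
--             value_groups.append(values)
--
--         group_counts.append(len(value_groups))
--         all_groups.append([sorted(list(group)) for group in value_groups])
--
--     return group_counts, all_groups
-- ===== SOURCE B (Python) =====
-- def f(n):
--     return n
--
-- def g(n):
--     return 3 * n + 1
--
-- def h(n):
--     return n + 81
--
-- def calculate_value_groups(max_n):
--     # Connected-component labelling: a single flat dict `comp` colours every value
--     # seen so far with the id (= birth step) of its group; no list of group-sets
--     # and no index bookkeeping exist at all.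
--     comp = {}
--     group_counts = []
--     all_groups = []
--     for n in range(1, max_n + 1):
--         triple = (f(n), g(n), h(n))
--         ids = set(comp[v] for v in triple if v in comp)
--         target = min(ids, default=n)
--         if len(ids) > 1:
--             for v in comp:
--                 if comp[v] in ids:
--                     comp[v] = target
--         for v in triple:
--             comp[v] = target
--         buckets = {}
--         for v, gid in comp.items():
--             buckets.setdefault(gid, []).append(v)
--         gids = sorted(buckets)
--         group_counts.append(len(gids))
--         all_groups.append([sorted(buckets[gid]) for gid in gids])
--     return group_counts, all_groups
-- ===== Notes on version B (the rewrite author's own statement) =====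
-- stated objective: alternative
-- what changed: A maintains a list of group-sets and each step scans it with enumerate collecting matching indices, merges into the lowest index and deletes the rest in descending index order; B maintains no group list at all: its only state is a flat dict colouring each seen value with the id (= birth step) of its group, a merge is a relabelling pass over that colouring, and each snapshot is reconstructed by grouping the colouring by id in sorted-id order.
import Mathlib
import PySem

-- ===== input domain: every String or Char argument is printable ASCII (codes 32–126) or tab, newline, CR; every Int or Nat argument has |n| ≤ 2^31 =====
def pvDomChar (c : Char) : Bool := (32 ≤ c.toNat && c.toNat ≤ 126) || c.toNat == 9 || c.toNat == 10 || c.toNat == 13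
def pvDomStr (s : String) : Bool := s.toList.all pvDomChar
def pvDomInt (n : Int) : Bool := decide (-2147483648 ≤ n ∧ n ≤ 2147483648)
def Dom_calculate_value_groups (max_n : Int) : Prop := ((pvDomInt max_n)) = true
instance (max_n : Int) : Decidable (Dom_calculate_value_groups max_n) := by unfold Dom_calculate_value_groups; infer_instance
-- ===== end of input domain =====

-- B replaces A's list of group-sets (scanned with enumerate, merged into the lowest index,
-- remainder deleted by descending index) by a single flat colouring dict value -> group id
-- (id = birth step): merging is a relabelling pass, snapshots are regrouped by sorted id;
-- objective: alternative (same cost, different state representation).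

-- ===== PORT A =====
def pv_f (n : Int) : Int := n
def pv_g (n : Int) : Int := 3 * n + 1
def pv_h (n : Int) : Int := n + 81

-- one iteration of A's `for n in range(1, max_n+1)` body
-- (enumerate ported with Nat indices via zipIdx: Python's indices here are the same numbers;
--  `del value_groups[i]` / `value_groups[lowest]` use those nonnegative indices, so eraseIdx/set/getD are exact)
def cvgA_step (st : List (PySem.Set Int) × List Int × List (List (List Int))) (n : Int) :
    List (PySem.Set Int) × List Int × List (List (List Int)) :=
  let vg := st.1
  let values : PySem.Set Int := PySem.Set.ofList [pv_f n, pv_g n, pv_h n]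
  let matching : List Nat := vg.zipIdx.foldl
    (fun acc gi => if PySem.Set.inter gi.1 values ≠ [] then acc ++ [gi.2] else acc) []
  let vg' :=
    match matching with
    | [] => vg ++ [values]
    | m :: rest =>
      let lowest := (PySem.List.min? (m :: rest) (fun x => x)).getD 0
      let vg1 := vg.set lowest (PySem.Set.update (vg.getD lowest []) values)
      (PySem.List.sorted rest (fun x => x) true).foldl
        (fun vg i =>
          (vg.set lowest (PySem.Set.update (vg.getD lowest []) (vg.getD i []))).eraseIdx i)
        vg1
  (vg', st.2.1 ++ [(vg'.length : Int)],
   st.2.2 ++ [vg'.map (fun grp => PySem.List.sorted grp (fun x => x) false)])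

def calculate_value_groups (max_n : Int) : List Int × List (List (List Int)) :=
  let st := (PySem.List.pyRange 1 (max_n + 1)).foldl cvgA_step ([], [], [])
  (st.2.1, st.2.2)

-- ===== PORT B =====
def pvB_f (n : Int) : Int := n
def pvB_g (n : Int) : Int := 3 * n + 1
def pvB_h (n : Int) : Int := n + 81

-- ids = set(comp[v] for v in triple if v in comp)
def bIds (comp : PySem.Dict Int Int) (triple : List Int) : PySem.Set Int :=
  PySem.Set.ofList ((triple.filter (fun v => comp.contains v)).map (fun v => comp.getD v 0))

-- if len(ids) > 1: for v in comp: if comp[v] in ids: comp[v] = target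
def bRelabel (comp : PySem.Dict Int Int) (ids : PySem.Set Int) (target : Int) :
    PySem.Dict Int Int :=
  if 1 < ids.length then
    comp.keys.foldl
      (fun d v => if PySem.Set.contains ids (d.getD v 0) then d.insert v target else d) comp
  else comp

-- for v in triple: comp[v] = target
def bInsertAll (comp : PySem.Dict Int Int) (triple : List Int) (target : Int) :
    PySem.Dict Int Int :=
  triple.foldl (fun d v => d.insert v target) comp

-- the whole mutation of `comp` done by one iteration of B's loop body
-- (target = min(ids, default=n) is PySem.List.minD)
def bStepDict (comp : PySem.Dict Int Int) (n : Int) : PySem.Dict Int Int :=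
  bInsertAll
    (bRelabel comp (bIds comp [pvB_f n, pvB_g n, pvB_h n])
      (PySem.List.minD (bIds comp [pvB_f n, pvB_g n, pvB_h n]) (fun x => x) n))
    [pvB_f n, pvB_g n, pvB_h n]
    (PySem.List.minD (bIds comp [pvB_f n, pvB_g n, pvB_h n]) (fun x => x) n)

-- for v, gid in comp.items(): buckets.setdefault(gid, []).append(v)
def bBuckets (comp : PySem.Dict Int Int) : PySem.Dict Int (List Int) :=
  comp.items.foldl (fun d p => d.modify p.2 [] (fun cur => cur ++ [p.1])) PySem.Dict.empty

-- gids = sorted(buckets)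
def bGids (comp : PySem.Dict Int Int) : List Int :=
  PySem.List.sorted (bBuckets comp).keys (fun x => x) false

-- one iteration of B's loop body (state = (comp, group_counts, all_groups))
def cvgB_step (st : PySem.Dict Int Int × List Int × List (List (List Int))) (n : Int) :
    PySem.Dict Int Int × List Int × List (List (List Int)) :=
  (bStepDict st.1 n,
   st.2.1 ++ [((bGids (bStepDict st.1 n)).length : Int)],
   st.2.2 ++ [(bGids (bStepDict st.1 n)).map
     (fun gid => PySem.List.sorted ((bBuckets (bStepDict st.1 n)).getD gid [])
       (fun x => x) false)])

def calculate_value_groups_alt (max_n : Int) : List Int × List (List (List Int)) :=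
  let st := (PySem.List.pyRange 1 (max_n + 1)).foldl cvgB_step (PySem.Dict.empty, [], [])
  (st.2.1, st.2.2)

-- ===== PRECONDITION & SPEC =====
def Spec_calculate_value_groups (max_n : Int) (out : List Int × List (List (List Int))) : Prop := out = calculate_value_groups_alt max_n
instance (max_n : Int) (out : List Int × List (List (List Int))) : Decidable (Spec_calculate_value_groups max_n out) := by unfold Spec_calculate_value_groups; infer_instance

-- ===== CLAIM (what is proved, stated in full; the proofs are below) =====
def Claim_equal_calculate_value_groups : Prop := ∀ (max_n : Int), Dom_calculate_value_groups max_n → Spec_calculate_value_groups max_n (calculate_value_groups max_n)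

-- ===== LEMMAS AND PROOFS =====

-- the group-list transformation A's loop body performs (so that cvgA_step is literally (aGroups, …))
def aGroups (vg : List (PySem.Set Int)) (values : PySem.Set Int) : List (PySem.Set Int) :=
  let matching : List Nat := vg.zipIdx.foldl
    (fun acc gi => if PySem.Set.inter gi.1 values ≠ [] then acc ++ [gi.2] else acc) []
  match matching with
  | [] => vg ++ [values]
  | m :: rest =>
    let lowest := (PySem.List.min? (m :: rest) (fun x => x)).getD 0
    let vg1 := vg.set lowest (PySem.Set.update (vg.getD lowest []) values)
    (PySem.List.sorted rest (fun x => x) true).foldl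
      (fun vg i =>
        (vg.set lowest (PySem.Set.update (vg.getD lowest []) (vg.getD i []))).eraseIdx i)
      vg1

lemma cvgA_step_eq (st : List (PySem.Set Int) × List Int × List (List (List Int))) (n : Int) :
    cvgA_step st n =
      (aGroups st.1 (PySem.Set.ofList [pv_f n, pv_g n, pv_h n]),
       st.2.1 ++ [((aGroups st.1 (PySem.Set.ofList [pv_f n, pv_g n, pv_h n])).length : Int)],
       st.2.2 ++ [(aGroups st.1 (PySem.Set.ofList [pv_f n, pv_g n, pv_h n])).map
         (fun grp => PySem.List.sorted grp (fun x => x) false)]) := rfl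

-- basic transfers ------------------------------------------------------------

lemma decide_touch (V g : PySem.Set Int) :
    decide (PySem.Set.inter g V ≠ []) = !(PySem.Set.isdisjoint V g) := by
  have h : PySem.Set.inter g V = [] ↔ PySem.Set.isdisjoint V g = true := by
    rw [PySem.Set.isdisjoint_iff, List.eq_nil_iff_forall_not_mem]
    constructor
    · intro h x hxV hxg
      exact h x ((PySem.Set.mem_inter g V x).mpr ⟨hxg, hxV⟩)
    · intro h x hx
      obtain ⟨h1, h2⟩ := (PySem.Set.mem_inter g V x).mp hx
      exact h _ h2 h1
  by_cases hd : PySem.Set.isdisjoint V g = true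
  · simp [hd, h.mpr hd]
  · simp only [Bool.not_eq_true] at hd
    simp only [hd, Bool.not_false, decide_eq_true_eq]
    intro hc
    exact absurd (h.mp hc) (by simp [hd])

lemma forall₂_mem_right {α β : Type} {R : α → β → Prop} :
    ∀ {l : List α} {l' : List β}, List.Forall₂ R l l' → ∀ b ∈ l', ∃ a ∈ l, R a b := by
  intro l l' h
  induction h with
  | nil => simp
  | @cons a b l l' hab htail ih =>
    intro c hc
    rcases List.mem_cons.mp hc with rfl | hc
    · exact ⟨a, List.mem_cons_self, hab⟩
    · obtain ⟨a', ha', hr⟩ := ih c hc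
      exact ⟨a', List.mem_cons_of_mem _ ha', hr⟩

lemma forall₂_mem_left {α β : Type} {R : α → β → Prop} :
    ∀ {l : List α} {l' : List β}, List.Forall₂ R l l' → ∀ a ∈ l, ∃ b ∈ l', R a b := by
  intro l l' h
  induction h with
  | nil => simp
  | @cons a b l l' hab htail ih =>
    intro c hc
    rcases List.mem_cons.mp hc with rfl | hc
    · exact ⟨b, List.mem_cons_self, hab⟩
    · obtain ⟨b', hb', hr⟩ := ih c hc
      exact ⟨b', List.mem_cons_of_mem _ hb', hr⟩

lemma forall₂_split {α β : Type} {R : α → β → Prop} :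
    ∀ (l₁ : List α) {a : α} {l₂ : List α} {l : List β},
      List.Forall₂ R (l₁ ++ a :: l₂) l →
      ∃ m₁ b m₂, l = m₁ ++ b :: m₂ ∧ List.Forall₂ R l₁ m₁ ∧ R a b ∧ List.Forall₂ R l₂ m₂ := by
  intro l₁
  induction l₁ with
  | nil =>
    intro a l₂ l h
    simp only [List.nil_append] at h
    obtain ⟨b, u', hab, htail, rfl⟩ := List.forall₂_cons_left_iff.mp h
    exact ⟨[], b, u', rfl, List.Forall₂.nil, hab, htail⟩
  | cons x l₁ ih =>
    intro a l₂ l h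
    simp only [List.cons_append] at h
    obtain ⟨b, u', hab, htail, rfl⟩ := List.forall₂_cons_left_iff.mp h
    obtain ⟨m₁, b', m₂, rfl, h1, h2, h3⟩ := ih htail
    exact ⟨b :: m₁, b', m₂, rfl, List.Forall₂.cons hab h1, h2, h3⟩

lemma forall₂_imp_mem {α β : Type} {R S : α → β → Prop} :
    ∀ {l : List α} {l' : List β}, List.Forall₂ R l l' →
      (∀ a b, a ∈ l → b ∈ l' → R a b → S a b) → List.Forall₂ S l l' := by
  intro l l' h
  induction h with
  | nil => intro _; exact List.Forall₂.nil
  | @cons a b l l' hab htail ih =>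
    intro himp
    exact List.Forall₂.cons
      (himp a b List.mem_cons_self List.mem_cons_self hab)
      (ih fun a' b' ha hb => himp a' b' (List.mem_cons_of_mem _ ha) (List.mem_cons_of_mem _ hb))

lemma forall₂_filter₂ {α β : Type} {R : α → β → Prop} (p : α → Bool) (q : β → Bool) :
    ∀ {l : List α} {l' : List β}, List.Forall₂ R l l' →
      (∀ a b, R a b → p a = q b) → List.Forall₂ R (l.filter p) (l'.filter q) := by
  intro l l' h
  induction h with
  | nil => intro _; simp
  | @cons a b l l' hab htail ih =>
    intro hpq
    rw [List.filter_cons, List.filter_cons, hpq a b hab]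
    cases hb : q b with
    | true => simpa using List.Forall₂.cons hab (ih hpq)
    | false => simpa using ih hpq

lemma split_first (dj : PySem.Set Int → Bool) :
    ∀ (l : List (PySem.Set Int)),
      (∀ g ∈ l, dj g = true) ∨
      ∃ pre gA suf, l = pre ++ gA :: suf ∧ (∀ g ∈ pre, dj g = true) ∧ dj gA = false := by
  intro l
  induction l with
  | nil => exact Or.inl (by simp)
  | cons g l ih =>
    cases hg : dj g with
    | false => exact Or.inr ⟨[], g, l, rfl, by simp, hg⟩
    | true =>
      rcases ih with hall | ⟨pre, gA, suf, rfl, hpre, hgA⟩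
      · left
        intro g' hg'
        rcases List.mem_cons.mp hg' with rfl | hm
        · exact hg
        · exact hall g' hm
      · right
        refine ⟨g :: pre, gA, suf, rfl, ?_, hgA⟩
        intro g' hg'
        rcases List.mem_cons.mp hg' with rfl | hm
        · exact hg
        · exact hpre g' hm

-- folds over sets (A's merged-group construction) -----------------------------

lemma mem_foldl_update_getD (vg : List (PySem.Set Int)) :
    ∀ (ds : List Nat) (s0 : PySem.Set Int) (x : Int),
      (x ∈ ds.foldl (fun s i => PySem.Set.update s (vg.getD i [])) s0) ↔
        x ∈ s0 ∨ ∃ i ∈ ds, x ∈ vg.getD i [] := by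
  intro ds
  induction ds with
  | nil => simp
  | cons i ds ih =>
    intro s0 x
    rw [List.foldl_cons, List.exists_mem_cons_iff, ih, PySem.Set.mem_update]
    tauto

lemma nodup_foldl_update_getD (vg : List (PySem.Set Int)) :
    ∀ (ds : List Nat) (s0 : PySem.Set Int), s0.Nodup →
      (ds.foldl (fun s i => PySem.Set.update s (vg.getD i [])) s0).Nodup := by
  intro ds
  induction ds with
  | nil => exact fun s0 h => h
  | cons i ds ih =>
    intro s0 h
    rw [List.foldl_cons]
    exact ih _ (PySem.Set.nodup_update _ _ h)

-- closed form of A's in-place merge/delete loop ------------------------------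

def pvU (vg : List (PySem.Set Int)) (k : Nat) (ds : List Nat) : PySem.Set Int :=
  ds.foldl (fun s i => PySem.Set.update s (vg.getD i [])) (vg.getD k [])

def pvRes (vg : List (PySem.Set Int)) (k : Nat) (ds : List Nat) : List (PySem.Set Int) :=
  (List.range vg.length).filterMap (fun j => if j ∈ ds then none
    else if j = k then some (pvU vg k ds) else some (vg.getD j []))

lemma map_getD_range (l : List (PySem.Set Int)) :
    (List.range l.length).map (fun j => l.getD j []) = l := by
  apply List.ext_getElem
  · simp
  · intro i h1 h2
    simp only [List.getElem_map, List.getElem_range, List.getD_eq_getElem?_getD,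
      List.getElem?_eq_getElem h2, Option.getD_some]

lemma afold_eq :
    ∀ (ds : List Nat) (vg : List (PySem.Set Int)) (k : Nat),
      List.Pairwise (· > ·) ds → (∀ i ∈ ds, k < i ∧ i < vg.length) → k < vg.length →
      ds.foldl (fun vg i =>
          (vg.set k (PySem.Set.update (vg.getD k []) (vg.getD i []))).eraseIdx i) vg
        = pvRes vg k ds := by
  intro ds
  induction ds with
  | nil =>
    intro vg k _ _ hk
    rw [List.foldl_nil]
    unfold pvRes
    rw [List.filterMap_congr (g := fun j => some (vg.getD j []))]
    · rw [show (fun j => some (vg.getD j [])) = some ∘ (fun j => vg.getD j []) from rfl,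
        List.filterMap_eq_map, map_getD_range]
    · intro j hj
      rw [if_neg (List.not_mem_nil)]
      by_cases hjk : j = k
      · subst hjk
        rw [if_pos rfl]
        unfold pvU
        rw [List.foldl_nil]
      · rw [if_neg hjk]
  | cons i ds ih =>
    intro vg k hpw hbnd hk
    obtain ⟨hki, hilen⟩ := hbnd i List.mem_cons_self
    rw [List.foldl_cons]
    set g2 : List (PySem.Set Int) :=
      (vg.set k (PySem.Set.update (vg.getD k []) (vg.getD i []))).eraseIdx i with hg2
    have hlen2 : g2.length = vg.length - 1 := by
      rw [hg2, List.length_eraseIdx]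
      simp [hilen]
    have hds_lt : ∀ j ∈ ds, j < i := fun j hj => (List.pairwise_cons.mp hpw).1 j hj
    have hbnd2 : ∀ j ∈ ds, k < j ∧ j < g2.length := fun j hj =>
      ⟨(hbnd j (List.mem_cons_of_mem _ hj)).1, by have := hds_lt j hj; omega⟩
    have hk2 : k < g2.length := by omega
    rw [ih g2 k (List.pairwise_cons.mp hpw).2 hbnd2 hk2]
    have hget2 : ∀ j : Nat, j < i →
        g2.getD j [] = if j = k then PySem.Set.update (vg.getD k []) (vg.getD i [])
          else vg.getD j [] := by
      intro j hj
      rw [hg2, List.getD_eq_getElem?_getD, List.getElem?_eraseIdx, if_pos hj,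
        List.getElem?_set]
      by_cases hjk : j = k
      · subst hjk
        rw [if_pos rfl, if_pos (by omega), if_pos rfl]
        simp
      · rw [if_neg (fun h => hjk h.symm), if_neg hjk, ← List.getD_eq_getElem?_getD]
    have hgetHigh : ∀ j : Nat, i ≤ j → g2.getD j [] = vg.getD (j + 1) [] := by
      intro j hj
      rw [hg2, List.getD_eq_getElem?_getD, List.getElem?_eraseIdx, if_neg (by omega),
        List.getElem?_set, if_neg (by omega), ← List.getD_eq_getElem?_getD]
    have hU : pvU g2 k ds = pvU vg k (i :: ds) := by
      unfold pvU
      rw [List.foldl_cons]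
      have hbase : g2.getD k [] = PySem.Set.update (vg.getD k []) (vg.getD i []) := by
        rw [hget2 k hki, if_pos rfl]
      rw [hbase]
      exact PySem.List.foldl_congr_mem ds _ _ _ (fun acc j hj => by
        rw [hget2 j (hds_lt j hj), if_neg (by have := hbnd2 j hj; omega)])
    unfold pvRes
    obtain ⟨m, hm⟩ : ∃ m, vg.length = i + 1 + m := ⟨vg.length - 1 - i, by omega⟩
    have hg2m : g2.length = i + m := by omega
    have hmid : List.filterMap
        (fun j => if j ∈ i :: ds then none
          else if j = k then some (pvU vg k (i :: ds)) else some (vg.getD j [])) [i]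
        = ([] : List (PySem.Set Int)) := by simp
    have hr : List.range (i + 1) = List.range i ++ [i] := List.range_succ
    rw [hg2m, hm, List.range_add, List.range_add, hr, List.filterMap_append,
      List.filterMap_append, List.filterMap_append, hmid, List.append_nil]
    congr 1
    · apply List.filterMap_congr
      intro j hj
      have hji : j < i := List.mem_range.mp hj
      have hmem : (j ∈ i :: ds) ↔ (j ∈ ds) := by
        rw [List.mem_cons]
        constructor
        · rintro (rfl | h)
          · omega
          · exact h
        · exact Or.inr
      by_cases hjds : j ∈ ds
      · rw [if_pos hjds, if_pos (hmem.mpr hjds)]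
      · rw [if_neg hjds, if_neg (fun h => hjds (hmem.mp h))]
        by_cases hjk : j = k
        · subst hjk
          rw [if_pos rfl, if_pos rfl, hU]
        · rw [if_neg hjk, if_neg hjk, hget2 j hji, if_neg hjk]
    · rw [List.filterMap_map, List.filterMap_map]
      apply List.filterMap_congr
      intro t ht
      have htm : t < m := List.mem_range.mp ht
      show (if i + t ∈ ds then none
            else if i + t = k then some (pvU g2 k ds) else some (g2.getD (i + t) [])) = _
      simp only [Function.comp_apply]
      have h1 : ¬ (i + t ∈ ds) := fun h => by have := hds_lt _ h; omega
      have h2 : ¬ (i + t = k) := by omega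
      have h3 : ¬ (i + 1 + t ∈ i :: ds) := by
        rw [List.mem_cons]
        rintro (h | h)
        · omega
        · have := hds_lt _ h; omega
      have h4 : ¬ (i + 1 + t = k) := by omega
      rw [if_neg h1, if_neg h2, if_neg h3, if_neg h4, hgetHigh (i + t) (by omega)]
      have heq : i + t + 1 = i + 1 + t := by omega
      rw [heq]

lemma filterMap_range'_filter (q : PySem.Set Int → Bool) :
    ∀ (l : List (PySem.Set Int)) (m : Nat),
      (List.range' m l.length).filterMap
          (fun j => if q (l.getD (j - m) []) then some (l.getD (j - m) []) else none)
        = l.filter q := by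
  intro l
  induction l with
  | nil => intro m; simp
  | cons s l ih =>
    intro m
    rw [List.length_cons, List.range'_succ, List.filterMap_cons, List.filter_cons]
    have h0 : (s :: l).getD (m - m) [] = s := by simp
    rw [h0]
    have hcg : (List.range' (m + 1) l.length).filterMap
        (fun j => if q ((s :: l).getD (j - m) []) = true then some ((s :: l).getD (j - m) [])
          else none)
        = (List.range' (m + 1) l.length).filterMap
        (fun j => if q (l.getD (j - (m + 1)) []) = true then some (l.getD (j - (m + 1)) [])
          else none) := by
      apply List.filterMap_congr
      intro j hj
      have hj' := List.mem_range'_1.mp hj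
      have hsub : j - m = (j - (m + 1)) + 1 := by omega
      rw [hsub, List.getD_cons_succ]
    by_cases hq : q s = true
    · rw [if_pos hq, if_pos hq, hcg, ih]
    · rw [if_neg hq, if_neg (by simpa using hq), hcg, ih]

lemma mem_zipIdx_iff {l : List (PySem.Set Int)} {k i : Nat} {x : PySem.Set Int} :
    (x, i) ∈ l.zipIdx k ↔ k ≤ i ∧ i < k + l.length ∧ l[i - k]? = some x := by
  constructor
  · intro h
    obtain ⟨h1, h2, h3⟩ := List.mem_zipIdx h
    exact ⟨h1, h2, by rw [List.getElem?_eq_getElem (by omega)]; exact congrArg some h3.symm⟩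
  · rintro ⟨h1, h2, h3⟩
    have hlt : i - k < l.length := (List.getElem?_eq_some_iff.mp h3).1
    have hlen : i - k < (l.zipIdx k).length := by simpa using hlt
    have hmem : (l.zipIdx k)[i - k]'hlen = (l[i - k]'hlt, k + (i - k)) :=
      List.getElem_zipIdx hlen
    have hx : l[i - k]'hlt = x := by
      rw [List.getElem?_eq_getElem hlt] at h3
      exact Option.some.inj h3
    have hik : k + (i - k) = i := by omega
    rw [hx, hik] at hmem
    exact hmem ▸ List.getElem_mem _

lemma zipIdx_fst_mem {l : List (PySem.Set Int)} {k : Nat} {gi : PySem.Set Int × Nat}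
    (h : gi ∈ l.zipIdx k) : gi.1 ∈ l := by
  obtain ⟨g, i⟩ := gi
  obtain ⟨h1, h2, h3⟩ := List.mem_zipIdx h
  exact h3 ▸ List.getElem_mem _

lemma matching_clean (V : PySem.Set Int) {vg : List (PySem.Set Int)}
    (h : ∀ g ∈ vg, PySem.Set.isdisjoint V g = true) :
    vg.zipIdx.foldl
      (fun acc gi => if PySem.Set.inter gi.1 V ≠ [] then acc ++ [gi.2] else acc) []
      = ([] : List Nat) := by
  rw [PySem.List.foldl_append_ite (p := fun gi : PySem.Set Int × Nat => PySem.Set.inter gi.1 V ≠ [])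
    (f := fun gi : PySem.Set Int × Nat => gi.2), List.nil_append]
  have hfq : (fun gi : PySem.Set Int × Nat => decide (PySem.Set.inter gi.1 V ≠ []))
      = (fun gi : PySem.Set Int × Nat => !(PySem.Set.isdisjoint V gi.1)) :=
    funext fun gi => decide_touch V gi.1
  rw [hfq, List.filter_eq_nil_iff.mpr, List.map_nil]
  intro gi hgi
  rw [h gi.1 (zipIdx_fst_mem hgi)]
  simp

lemma matching_split (V : PySem.Set Int) (pre suf : List (PySem.Set Int)) (gA : PySem.Set Int)
    (hpre : ∀ g ∈ pre, PySem.Set.isdisjoint V g = true)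
    (hgA : PySem.Set.isdisjoint V gA = false) :
    (pre ++ gA :: suf).zipIdx.foldl
      (fun acc gi => if PySem.Set.inter gi.1 V ≠ [] then acc ++ [gi.2] else acc) []
      = pre.length :: ((suf.zipIdx (pre.length + 1)).filter
          (fun gi => !(PySem.Set.isdisjoint V gi.1))).map (fun gi => gi.2) := by
  rw [PySem.List.foldl_append_ite (p := fun gi : PySem.Set Int × Nat => PySem.Set.inter gi.1 V ≠ [])
    (f := fun gi : PySem.Set Int × Nat => gi.2), List.nil_append]
  have hfq : (fun gi : PySem.Set Int × Nat => decide (PySem.Set.inter gi.1 V ≠ []))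
      = (fun gi : PySem.Set Int × Nat => !(PySem.Set.isdisjoint V gi.1)) :=
    funext fun gi => decide_touch V gi.1
  rw [hfq, List.zipIdx_append, List.zipIdx_cons, List.filter_append, List.filter_cons]
  have h1 : (pre.zipIdx 0).filter (fun gi => !(PySem.Set.isdisjoint V gi.1)) = [] := by
    rw [List.filter_eq_nil_iff]
    intro gi hgi
    rw [hpre gi.1 (zipIdx_fst_mem hgi)]
    simp
  rw [h1, List.nil_append, if_pos (by rw [hgA]; rfl), List.map_cons]
  simp

-- the result of A's loop body in the touched case, with the members of the merged group
lemma aSide (V : PySem.Set Int) (pre suf : List (PySem.Set Int)) (gA : PySem.Set Int)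
    (hgnd : gA.Nodup)
    (hpre : ∀ g ∈ pre, PySem.Set.isdisjoint V g = true)
    (hgA : PySem.Set.isdisjoint V gA = false) :
    ∃ U : PySem.Set Int,
      aGroups (pre ++ gA :: suf) V
          = pre ++ U :: suf.filter (fun g => PySem.Set.isdisjoint V g)
        ∧ U.Nodup
        ∧ (∀ x : Int, x ∈ U ↔ (x ∈ gA ∨ x ∈ V) ∨
            ∃ g ∈ suf, PySem.Set.isdisjoint V g = false ∧ x ∈ g) := by
  have hmat := matching_split V pre suf gA hpre hgA
  set k := pre.length with hk
  set restIdx : List Nat := ((suf.zipIdx (k + 1)).filter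
      (fun gi => !(PySem.Set.isdisjoint V gi.1))).map (fun gi => gi.2) with hrest
  have hmemR : ∀ j : Nat, j ∈ restIdx ↔
      ∃ t : Nat, ∃ ht : t < suf.length,
        j = k + 1 + t ∧ PySem.Set.isdisjoint V (suf[t]'ht) = false := by
    intro j
    rw [hrest, List.mem_map]
    constructor
    · rintro ⟨⟨g, j'⟩, hmem, rfl⟩
      rw [List.mem_filter] at hmem
      obtain ⟨hz, hq⟩ := hmem
      obtain ⟨hb1, hb2, hb3⟩ := mem_zipIdx_iff.mp hz
      refine ⟨j' - (k + 1), (List.getElem?_eq_some_iff.mp hb3).1, by omega, ?_⟩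
      have : suf[j' - (k + 1)]'(List.getElem?_eq_some_iff.mp hb3).1 = g := by
        rw [List.getElem?_eq_getElem ((List.getElem?_eq_some_iff.mp hb3).1)] at hb3
        exact Option.some.inj hb3
      rw [this]
      simpa using hq
    · rintro ⟨t, ht, rfl, hdis⟩
      refine ⟨(suf[t]'ht, k + 1 + t), ?_, rfl⟩
      rw [List.mem_filter]
      constructor
      · rw [mem_zipIdx_iff]
        refine ⟨by omega, by omega, ?_⟩
        rw [show k + 1 + t - (k + 1) = t from by omega, List.getElem?_eq_getElem ht]
      · rw [hdis]; rfl
  have hbndR : ∀ j ∈ restIdx, k + 1 ≤ j ∧ j < k + 1 + suf.length := by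
    intro j hj
    obtain ⟨t, ht, rfl, _⟩ := (hmemR j).mp hj
    omega
  have hpairR : List.Pairwise (· < ·) restIdx := by
    have hsub : restIdx.Sublist ((suf.zipIdx (k + 1)).map (fun gi => gi.2)) :=
      List.Sublist.map _ List.filter_sublist
    have : ((suf.zipIdx (k + 1)).map (fun gi => gi.2)) = List.range' (k + 1) suf.length :=
      List.zipIdx_map_snd (k + 1) suf
    rw [this] at hsub
    exact (List.pairwise_lt_range' 1).sublist hsub
  have hlow : (PySem.List.min? (k :: restIdx) (fun x => x)).getD 0 = k := by
    rw [PySem.List.min?_id_cons, Option.getD_some]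
    have h1 := (PySem.List.foldl_min_le restIdx k).1
    rcases PySem.List.foldl_min_mem restIdx k with h2 | h2
    · exact h2
    · have := (hbndR _ h2).1
      omega
  have hvg1 : (pre ++ gA :: suf).set k
        (PySem.Set.update ((pre ++ gA :: suf).getD k []) V)
      = pre ++ PySem.Set.update gA V :: suf := by
    have hgetk : (pre ++ gA :: suf).getD k [] = gA := by
      rw [List.getD_eq_getElem?_getD, List.getElem?_append_right (le_refl k), Nat.sub_self]
      simp
    rw [hgetk, List.set_append, if_neg (by omega), Nat.sub_self, List.set_cons_zero]
  have hsort : PySem.List.sorted restIdx (fun x => x) true = restIdx.reverse :=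
    PySem.List.sorted_rev_eq_of_perm_of_pairwise_gt _ _ _ (List.reverse_perm restIdx)
      (List.pairwise_reverse.mpr hpairR)
  have hlen1 : (pre ++ PySem.Set.update gA V :: suf).length = k + 1 + suf.length := by
    rw [List.length_append, List.length_cons]
    omega
  have hbnd2 : ∀ i ∈ restIdx.reverse,
      k < i ∧ i < (pre ++ PySem.Set.update gA V :: suf).length := by
    intro i hi
    have := hbndR i (List.mem_reverse.mp hi)
    omega
  have hafold := afold_eq restIdx.reverse (pre ++ PySem.Set.update gA V :: suf) k
    (by
      rw [List.pairwise_reverse]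
      exact hpairR)
    hbnd2 (by omega)
  refine ⟨pvU (pre ++ PySem.Set.update gA V :: suf) k restIdx.reverse, ?_, ?_, ?_⟩
  · show aGroups (pre ++ gA :: suf) V = _
    simp only [aGroups, hmat]
    rw [hlow, hvg1, hsort, hafold]
    unfold pvRes
    rw [hlen1, List.range_add, List.filterMap_append]
    have hr1 : List.range (k + 1) = List.range k ++ [k] := List.range_succ
    rw [hr1, List.filterMap_append]
    have hgetpre : ∀ j : Nat, j < k →
        (pre ++ PySem.Set.update gA V :: suf).getD j [] = pre.getD j [] := by
      intro j hj
      rw [List.getD_eq_getElem?_getD, List.getElem?_append_left (by omega),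
        ← List.getD_eq_getElem?_getD]
    have hgetsuf : ∀ t : Nat,
        (pre ++ PySem.Set.update gA V :: suf).getD (k + 1 + t) [] = suf.getD t [] := by
      intro t
      rw [List.getD_eq_getElem?_getD, List.getElem?_append_right (by omega)]
      have : k + 1 + t - pre.length = t + 1 := by omega
      rw [this, List.getElem?_cons_succ, ← List.getD_eq_getElem?_getD]
    have e1 : (List.range k).filterMap
        (fun j => if j ∈ restIdx.reverse then none
          else if j = k then some (pvU (pre ++ PySem.Set.update gA V :: suf) k restIdx.reverse)
          else some ((pre ++ PySem.Set.update gA V :: suf).getD j [])) = pre := by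
      rw [List.filterMap_congr (g := fun j => some (pre.getD j []))]
      · rw [show (fun j => some (pre.getD j [])) = some ∘ (fun j => pre.getD j []) from rfl,
          List.filterMap_eq_map, hk, map_getD_range]
      · intro j hj
        have hjk : j < k := List.mem_range.mp hj
        rw [if_neg (fun hm => by
            have := (hbndR j (List.mem_reverse.mp hm)).1
            omega),
          if_neg (by omega), hgetpre j hjk]
    have e2 : ([k] : List Nat).filterMap
        (fun j => if j ∈ restIdx.reverse then none
          else if j = k then some (pvU (pre ++ PySem.Set.update gA V :: suf) k restIdx.reverse)
          else some ((pre ++ PySem.Set.update gA V :: suf).getD j []))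
        = [pvU (pre ++ PySem.Set.update gA V :: suf) k restIdx.reverse] := by
      have hknotin : ¬ (k ∈ restIdx.reverse) := fun hm => by
        have := (hbndR k (List.mem_reverse.mp hm)).1
        omega
      rw [List.filterMap_cons, if_neg hknotin, if_pos rfl, List.filterMap_nil]
    have e3 : ((List.range suf.length).map (fun x => k + 1 + x)).filterMap
        (fun j => if j ∈ restIdx.reverse then none
          else if j = k then some (pvU (pre ++ PySem.Set.update gA V :: suf) k restIdx.reverse)
          else some ((pre ++ PySem.Set.update gA V :: suf).getD j []))
        = suf.filter (fun g => PySem.Set.isdisjoint V g) := by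
      rw [List.filterMap_map]
      have hrw := filterMap_range'_filter (fun g => PySem.Set.isdisjoint V g) suf 0
      rw [← List.range_eq_range'] at hrw
      rw [← hrw]
      apply List.filterMap_congr
      intro t ht
      have htl : t < suf.length := List.mem_range.mp ht
      show (if k + 1 + t ∈ restIdx.reverse then none
          else if k + 1 + t = k then some (pvU (pre ++ PySem.Set.update gA V :: suf) k
            restIdx.reverse)
          else some ((pre ++ PySem.Set.update gA V :: suf).getD (k + 1 + t) [])) = _
      simp only [Nat.sub_zero]
      have hts : suf.getD t [] = suf[t]'htl := by
        rw [List.getD_eq_getElem?_getD, List.getElem?_eq_getElem htl, Option.getD_some]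
      by_cases hdis : PySem.Set.isdisjoint V (suf[t]'htl) = false
      · rw [if_pos (List.mem_reverse.mpr ((hmemR _).mpr ⟨t, htl, rfl, hdis⟩)), hts, hdis]
        rfl
      · have hd : PySem.Set.isdisjoint V (suf[t]'htl) = true := by
          cases h : PySem.Set.isdisjoint V (suf[t]'htl)
          · exact absurd h hdis
          · rfl
        rw [if_neg (fun hm => by
            obtain ⟨t', ht', heqt, hd'⟩ := (hmemR _).mp (List.mem_reverse.mp hm)
            have : t' = t := by omega
            subst this
            exact hdis hd'),
          if_neg (by omega), hgetsuf t, hts, hd]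
        rfl
    rw [e1, e2, e3, List.append_assoc, List.singleton_append]
  · unfold pvU
    apply nodup_foldl_update_getD
    have : (pre ++ PySem.Set.update gA V :: suf).getD k [] = PySem.Set.update gA V := by
      rw [List.getD_eq_getElem?_getD, List.getElem?_append_right (le_refl k), Nat.sub_self]
      simp
    rw [this]
    exact PySem.Set.nodup_update _ _ hgnd
  · intro x
    unfold pvU
    rw [mem_foldl_update_getD]
    have hbase : (pre ++ PySem.Set.update gA V :: suf).getD k [] = PySem.Set.update gA V := by
      rw [List.getD_eq_getElem?_getD, List.getElem?_append_right (le_refl k), Nat.sub_self]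
      simp
    rw [hbase, PySem.Set.mem_update]
    constructor
    · rintro (h | ⟨i, hi, hx⟩)
      · exact Or.inl h
      · right
        obtain ⟨t, ht, rfl, hdis⟩ := (hmemR i).mp (List.mem_reverse.mp hi)
        refine ⟨suf[t]'ht, List.getElem_mem ht, hdis, ?_⟩
        have : (pre ++ PySem.Set.update gA V :: suf).getD (k + 1 + t) [] = suf[t]'ht := by
          rw [List.getD_eq_getElem?_getD, List.getElem?_append_right (by omega)]
          have h2 : k + 1 + t - pre.length = t + 1 := by omega
          rw [h2, List.getElem?_cons_succ, List.getElem?_eq_getElem ht, Option.getD_some]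
        rwa [this] at hx
    · rintro (h | ⟨g, hg, hdis, hx⟩)
      · exact Or.inl h
      · right
        obtain ⟨t, ht, rfl⟩ := List.mem_iff_getElem.mp hg
        refine ⟨k + 1 + t, List.mem_reverse.mpr ((hmemR _).mpr ⟨t, ht, rfl, hdis⟩), ?_⟩
        have : (pre ++ PySem.Set.update gA V :: suf).getD (k + 1 + t) [] = suf[t]'ht := by
          rw [List.getD_eq_getElem?_getD, List.getElem?_append_right (by omega)]
          have h2 : k + 1 + t - pre.length = t + 1 := by omega
          rw [h2, List.getElem?_cons_succ, List.getElem?_eq_getElem ht, Option.getD_some]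
        rwa [this]

-- B-side characterisations ----------------------------------------------------

lemma insertAll_get? (l : List Int) :
    ∀ (d : PySem.Dict Int Int) (t x : Int),
      (bInsertAll d l t).get? x = if x ∈ l then some t else d.get? x := by
  induction l with
  | nil => intro d t x; simp [bInsertAll]
  | cons v l ih =>
    intro d t x
    show (bInsertAll (d.insert v t) l t).get? x = _
    rw [ih]
    by_cases hx : x ∈ l
    · rw [if_pos hx, if_pos (List.mem_cons_of_mem _ hx)]
    · rw [if_neg hx, PySem.Dict.get?_insert]
      by_cases hxv : x = v
      · rw [if_pos hxv, if_pos (by rw [hxv]; exact List.mem_cons_self)]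
      · rw [if_neg hxv, if_neg (by rw [List.mem_cons]; tauto)]

lemma insertAll_keys_nodup (l : List Int) (d : PySem.Dict Int Int) (t : Int)
    (h : d.keys.Nodup) : (bInsertAll d l t).keys.Nodup :=
  PySem.Dict.nodup_keys_foldl_insert l (fun _ _ => t) d h

lemma relabelFold_get? (ids : PySem.Set Int) (t : Int) :
    ∀ (ks : List Int) (d : PySem.Dict Int Int), ks.Nodup →
      (∀ v ∈ ks, d.contains v = true) → ∀ x,
      (ks.foldl (fun d v =>
          if PySem.Set.contains ids (d.getD v 0) then d.insert v t else d) d).get? x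
        = (d.get? x).map (fun w => if x ∈ ks ∧ PySem.Set.contains ids w = true then t else w) := by
  intro ks
  induction ks with
  | nil =>
    intro d _ _ x
    rw [List.foldl_nil]
    cases d.get? x <;> simp
  | cons v ks ih =>
    intro d hnd hcont x
    have hvs : (d.get? v).isSome := by
      rw [← PySem.Dict.contains_eq_isSome_get?]
      exact hcont v List.mem_cons_self
    obtain ⟨wv, hwv⟩ := Option.isSome_iff_exists.mp hvs
    have hgdv : d.getD v 0 = wv := by
      rw [PySem.Dict.getD_eq_get?_getD, hwv]
      rfl
    have hnotv : v ∉ ks := (List.nodup_cons.mp hnd).1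
    have hndt : ks.Nodup := (List.nodup_cons.mp hnd).2
    rw [List.foldl_cons]
    by_cases hid : PySem.Set.contains ids wv = true
    · rw [hgdv, if_pos hid]
      rw [ih (d.insert v t) hndt (fun u hu => by
        rw [PySem.Dict.contains_insert]
        rw [hcont u (List.mem_cons_of_mem _ hu)]
        simp)]
      rw [PySem.Dict.get?_insert]
      by_cases hxv : x = v
      · subst hxv
        rw [if_pos rfl, hwv]
        simp only [Option.map_some]
        rw [if_neg (by rintro ⟨hm, _⟩; exact hnotv hm),
          if_pos ⟨List.mem_cons_self, hid⟩]
      · rw [if_neg hxv]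
        cases hdx : d.get? x with
        | none => rfl
        | some w =>
          simp only [Option.map_some]
          have : (x ∈ v :: ks) ↔ (x ∈ ks) := by
            rw [List.mem_cons]
            constructor
            · rintro (rfl | hm)
              · exact absurd rfl hxv
              · exact hm
            · exact Or.inr
          by_cases hm : x ∈ ks ∧ PySem.Set.contains ids w = true
          · rw [if_pos hm, if_pos ⟨this.mpr hm.1, hm.2⟩]
          · rw [if_neg hm, if_neg (by rintro ⟨h1, h2⟩; exact hm ⟨this.mp h1, h2⟩)]
    · rw [hgdv, if_neg hid]
      rw [ih d hndt (fun u hu => hcont u (List.mem_cons_of_mem _ hu))]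
      by_cases hxv : x = v
      · subst hxv
        rw [hwv]
        simp only [Option.map_some]
        rw [if_neg (by rintro ⟨hm, _⟩; exact hnotv hm),
          if_neg (by rintro ⟨_, h2⟩; exact hid h2)]
      · cases hdx : d.get? x with
        | none => rfl
        | some w =>
          simp only [Option.map_some]
          have : (x ∈ v :: ks) ↔ (x ∈ ks) := by
            rw [List.mem_cons]
            constructor
            · rintro (rfl | hm)
              · exact absurd rfl hxv
              · exact hm
            · exact Or.inr
          by_cases hm : x ∈ ks ∧ PySem.Set.contains ids w = true
          · rw [if_pos hm, if_pos ⟨this.mpr hm.1, hm.2⟩]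
          · rw [if_neg hm, if_neg (by rintro ⟨h1, h2⟩; exact hm ⟨this.mp h1, h2⟩)]

lemma relabelFold_keys (ids : PySem.Set Int) (t : Int) :
    ∀ (ks : List Int) (d : PySem.Dict Int Int), (∀ v ∈ ks, d.contains v = true) →
      (ks.foldl (fun d v =>
          if PySem.Set.contains ids (d.getD v 0) then d.insert v t else d) d).keys = d.keys := by
  intro ks
  induction ks with
  | nil => intro d _; rfl
  | cons v ks ih =>
    intro d hcont
    rw [List.foldl_cons]
    by_cases hid : PySem.Set.contains ids (d.getD v 0) = true
    · rw [if_pos hid]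
      rw [ih (d.insert v t) (fun u hu => by
        rw [PySem.Dict.contains_insert, hcont u (List.mem_cons_of_mem _ hu)]
        simp)]
      exact PySem.Dict.keys_insert_of_contains d t (hcont v List.mem_cons_self)
    · rw [if_neg hid]
      exact ih d (fun u hu => hcont u (List.mem_cons_of_mem _ hu))

-- the guarded relabel: when the guard is off every colour in ids already equals t,
-- so the pointwise description below holds in both branches
lemma bRelabel_get? (comp : PySem.Dict Int Int) (ids : PySem.Set Int) (t : Int)
    (hnd : comp.keys.Nodup) (hid : ∀ w ∈ ids, ids.length ≤ 1 → w = t) (x : Int) :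
    (bRelabel comp ids t).get? x
      = (comp.get? x).map (fun w => if PySem.Set.contains ids w = true then t else w) := by
  unfold bRelabel
  by_cases hlen : 1 < ids.length
  · rw [if_pos hlen]
    rw [relabelFold_get? ids t comp.keys comp hnd
      (fun v hv => (PySem.Dict.contains_iff_mem_keys comp v).mpr hv)]
    cases hdx : comp.get? x with
    | none => rfl
    | some w =>
      have hxk : x ∈ comp.keys := by
        by_contra hnk
        rw [(PySem.Dict.get?_eq_none_iff_not_mem_keys comp x).mpr hnk] at hdx
        simp at hdx
      simp only [Option.map_some]
      by_cases hw : PySem.Set.contains ids w = true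
      · rw [if_pos ⟨hxk, hw⟩, if_pos hw]
      · rw [if_neg (by rintro ⟨_, h2⟩; exact hw h2), if_neg hw]
  · rw [if_neg hlen]
    cases hdx : comp.get? x with
    | none => rfl
    | some w =>
      simp only [Option.map_some]
      by_cases hw : PySem.Set.contains ids w = true
      · rw [if_pos hw, hid w ((PySem.Set.contains_iff ids w).mp hw) (by omega)]
      · rw [if_neg hw]

lemma bRelabel_keys (comp : PySem.Dict Int Int) (ids : PySem.Set Int) (t : Int) :
    (bRelabel comp ids t).keys = comp.keys := by
  unfold bRelabel
  by_cases hlen : 1 < ids.length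
  · rw [if_pos hlen]
    exact relabelFold_keys ids t comp.keys comp
      (fun v hv => (PySem.Dict.contains_iff_mem_keys comp v).mpr hv)
  · rw [if_neg hlen]

lemma mem_bIds (comp : PySem.Dict Int Int) (triple : List Int) (g : Int) :
    g ∈ bIds comp triple ↔ ∃ v ∈ triple, comp.get? v = some g := by
  unfold bIds
  rw [PySem.Set.mem_ofList, List.mem_map]
  constructor
  · rintro ⟨v, hv, rfl⟩
    rw [List.mem_filter] at hv
    obtain ⟨h1, h2⟩ := hv
    have hs : (comp.get? v).isSome := by
      rw [← PySem.Dict.contains_eq_isSome_get?]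
      exact h2
    obtain ⟨w, hw⟩ := Option.isSome_iff_exists.mp hs
    refine ⟨v, h1, ?_⟩
    rw [hw, PySem.Dict.getD_eq_get?_getD, hw]
    rfl
  · rintro ⟨v, hv, hg⟩
    refine ⟨v, List.mem_filter.mpr ⟨hv, by rw [PySem.Dict.contains_eq_isSome_get?, hg]; rfl⟩, ?_⟩
    rw [PySem.Dict.getD_eq_get?_getD, hg]
    rfl

lemma minD_spec (ids : PySem.Set Int) (n : Int) (h : ids ≠ []) :
    PySem.List.minD ids (fun x => x) n ∈ ids ∧
      ∀ y ∈ ids, PySem.List.minD ids (fun x => x) n ≤ y := by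
  unfold PySem.List.minD
  cases hm : PySem.List.min? ids (fun x : Int => x) with
  | none => exact absurd ((PySem.List.min?_eq_none_iff _ _).mp hm) h
  | some m =>
    exact ⟨PySem.List.min?_mem hm, fun y hy => PySem.List.min?_isMin hm y hy⟩

lemma minD_nil (n : Int) : PySem.List.minD ([] : PySem.Set Int) (fun x => x) n = n := by
  unfold PySem.List.minD
  rw [(PySem.List.min?_eq_none_iff ([] : List Int) (fun x : Int => x)).mpr rfl]
  rfl

-- the buckets dict of B's snapshot, in closed form
lemma keys_bBuckets (comp : PySem.Dict Int Int) :
    (bBuckets comp).keys = PySem.Set.ofList comp.values := by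
  unfold bBuckets
  rw [PySem.Dict.keys_foldl_modify_key comp.items (fun p => p.2) []
    (fun _ p cur => cur ++ [p.1]) PySem.Dict.empty]
  show PySem.Set.update [] (comp.items.map (fun p => p.2)) = _
  rw [PySem.Set.update_nil_left]
  rfl

lemma getD_bBuckets (comp : PySem.Dict Int Int) (g : Int) :
    (bBuckets comp).getD g []
      = (comp.items.filter (fun p => p.2 == g)).map (fun p => p.1) := by
  unfold bBuckets
  have hswap : comp.items.foldl
      (fun d p => d.modify p.2 [] (fun cur => cur ++ [p.1])) PySem.Dict.empty
      = ((comp.items.map (fun p => (p.2, p.1))).foldl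
          (fun d p => d.modify p.1 [] (fun cur => cur ++ [p.2])) PySem.Dict.empty) := by
    rw [List.foldl_map]
  rw [hswap, PySem.Dict.getD_foldl_modify_append, PySem.Dict.getD_empty, List.nil_append,
    List.filter_map, List.map_map]
  rfl

-- membership of the per-id bucket B's snapshot sorts
lemma mem_bucket (comp : PySem.Dict Int Int) (hK : comp.keys.Nodup) (g x : Int) :
    x ∈ (bBuckets comp).getD g [] ↔ comp.get? x = some g := by
  rw [getD_bBuckets, List.mem_map]
  constructor
  · rintro ⟨p, hp, rfl⟩
    rw [List.mem_filter] at hp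
    obtain ⟨hp1, hp2⟩ := hp
    have : p.2 = g := by simpa using hp2
    have hpg : (p.1, g) ∈ comp.items := by
      rw [← this]
      exact hp1
    exact PySem.Dict.get?_of_mem_items comp hpg hK
  · intro hx
    refine ⟨(x, g), List.mem_filter.mpr
      ⟨(PySem.Dict.get?_eq_some_iff_mem_items comp x g hK).mp hx, by simp⟩, rfl⟩

lemma nodup_bucket (comp : PySem.Dict Int Int) (hK : comp.keys.Nodup) (g : Int) :
    ((bBuckets comp).getD g []).Nodup := by
  rw [getD_bBuckets]
  exact hK.sublist ((List.filter_sublist (l := comp.items)).map (fun p => p.1))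

-- the invariant tying A's group list to B's colouring dict
def InvR (comp : PySem.Dict Int Int) (grp : PySem.Set Int) (g : Int) : Prop :=
  grp.Nodup ∧ grp ≠ [] ∧ ∀ x : Int, x ∈ grp ↔ comp.get? x = some g

def InvAB (N : Int) (vg : List (PySem.Set Int)) (comp : PySem.Dict Int Int) (gl : List Int) :
    Prop :=
  comp.keys.Nodup ∧ List.Pairwise (· < ·) gl ∧ (∀ g ∈ gl, g < N) ∧
    (∀ x g' : Int, comp.get? x = some g' → g' ∈ gl) ∧
    List.Forall₂ (InvR comp) vg gl

lemma matched_iff (comp : PySem.Dict Int Int) (triple : List Int) {grp : PySem.Set Int}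
    {g : Int} (hR : ∀ x : Int, x ∈ grp ↔ comp.get? x = some g) :
    PySem.Set.isdisjoint (PySem.Set.ofList triple) grp = false ↔ g ∈ bIds comp triple := by
  rw [mem_bIds]
  constructor
  · intro hnd
    have : ¬ (PySem.Set.isdisjoint (PySem.Set.ofList triple) grp = true) := by
      rw [hnd]; simp
    rw [PySem.Set.isdisjoint_iff] at this
    push Not at this
    obtain ⟨x, hxV, hxg⟩ := this
    exact ⟨x, (PySem.Set.mem_ofList triple x).mp hxV, (hR x).mp hxg⟩
  · rintro ⟨v, hv, hg⟩
    cases hd : PySem.Set.isdisjoint (PySem.Set.ofList triple) grp with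
    | false => rfl
    | true =>
      exact absurd ((hR v).mpr hg)
        ((PySem.Set.isdisjoint_iff _ _).mp hd v ((PySem.Set.mem_ofList triple v).mpr hv))

-- B's snapshot ids equal the invariant's increasing colour list
lemma gids_eq (N : Int) (vg : List (PySem.Set Int)) (comp : PySem.Dict Int Int)
    (gl : List Int) (h : InvAB N vg comp gl) : bGids comp = gl := by
  obtain ⟨hK, hPW, _, hCov, hF⟩ := h
  unfold bGids
  rw [keys_bBuckets]
  apply PySem.List.sorted_eq_of_perm_of_pairwise_lt
  · rw [List.perm_ext_iff_of_nodup
        (List.Pairwise.imp (fun h => ne_of_lt h) hPW) (PySem.Set.nodup_ofList _)]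
    intro g
    rw [PySem.Set.mem_ofList]
    constructor
    · intro hg
      obtain ⟨grp, _, hR⟩ := forall₂_mem_right hF g hg
      obtain ⟨x, hx⟩ := List.exists_mem_of_ne_nil _ hR.2.1
      have := PySem.Dict.mem_items_of_get?_eq_some comp ((hR.2.2 x).mp hx)
      exact List.mem_map.mpr ⟨(x, g), this, rfl⟩
    · intro hg
      obtain ⟨⟨x, w⟩, hmem, hw⟩ := List.mem_map.mp hg
      cases hw
      exact hCov x _ (PySem.Dict.get?_of_mem_items comp hmem hK)
  · exact hPW

-- B's snapshot groups equal A's (as sorted lists)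
lemma snap_eq_aux (comp : PySem.Dict Int Int) (hK : comp.keys.Nodup) :
    ∀ {vg : List (PySem.Set Int)} {gl : List Int}, List.Forall₂ (InvR comp) vg gl →
      gl.map (fun gid => PySem.List.sorted ((bBuckets comp).getD gid []) (fun x => x) false)
        = vg.map (fun grp => PySem.List.sorted grp (fun x => x) false) := by
  intro vg gl hF
  induction hF with
  | nil => rfl
  | @cons grp g vgt glt hR htail ih =>
    rw [List.map_cons, List.map_cons, ih]
    congr 1
    apply PySem.List.sorted_eq_sorted_of_perm _ _ _ (fun a b h => h)
    rw [List.perm_ext_iff_of_nodup (nodup_bucket comp hK g) hR.1]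
    intro x
    rw [mem_bucket comp hK, hR.2.2]

lemma snap_eq (N : Int) (vg : List (PySem.Set Int)) (comp : PySem.Dict Int Int)
    (gl : List Int) (h : InvAB N vg comp gl) :
    (bGids comp).map (fun gid => PySem.List.sorted ((bBuckets comp).getD gid [])
        (fun x => x) false)
      = vg.map (fun grp => PySem.List.sorted grp (fun x => x) false) := by
  rw [gids_eq N vg comp gl h]
  exact snap_eq_aux comp h.1 h.2.2.2.2

-- the per-step preservation of the invariant
lemma step_inv (n : Int) (vg : List (PySem.Set Int)) (comp : PySem.Dict Int Int)
    (gl : List Int) (h : InvAB n vg comp gl) :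
    ∃ gl', InvAB (n + 1)
      (aGroups vg (PySem.Set.ofList [pv_f n, pv_g n, pv_h n])) (bStepDict comp n) gl' := by
  obtain ⟨hK, hPW, hBnd, hCov, hF⟩ := h
  set triple : List Int := [pvB_f n, pvB_g n, pvB_h n] with htriple
  set V : PySem.Set Int := PySem.Set.ofList triple with hV
  have hgoalV : PySem.Set.ofList [pv_f n, pv_g n, pv_h n] = V := rfl
  rw [hgoalV]
  have hmemV : ∀ x, x ∈ V ↔ x ∈ triple := fun x => PySem.Set.mem_ofList triple x
  rcases split_first (fun g => PySem.Set.isdisjoint V g) vg with hall |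
    ⟨pre, gA, suf, hvg, hpre, hgA⟩
  · -- no existing group touches the new values: B's ids set is empty
    have hid0 : bIds comp triple = [] := by
      rw [List.eq_nil_iff_forall_not_mem]
      intro g hg
      obtain ⟨v, hv, hgv⟩ := (mem_bIds comp triple g).mp hg
      obtain ⟨grp, hgrp, hR⟩ := forall₂_mem_right hF g (hCov v g hgv)
      exact (PySem.Set.isdisjoint_iff _ _).mp (hall grp hgrp) v ((hmemV v).mpr hv)
        ((hR.2.2 v).mpr hgv)
    have hbs : bStepDict comp n = bInsertAll comp triple n := by
      unfold bStepDict
      rw [← htriple, hid0, minD_nil]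
      unfold bRelabel
      rw [if_neg (by simp)]
    have hA : aGroups vg V = vg ++ [V] := by
      simp only [aGroups, matching_clean V hall]
    rw [hA, hbs]
    refine ⟨gl ++ [n], insertAll_keys_nodup triple comp n hK, ?_, ?_, ?_, ?_⟩
    · rw [List.pairwise_append]
      refine ⟨hPW, List.pairwise_singleton _ _, ?_⟩
      intro a ha b hb
      rw [List.mem_singleton] at hb
      subst hb
      exact hBnd a ha
    · intro g hg
      rcases List.mem_append.mp hg with hg | hg
      · have := hBnd g hg; omega
      · rw [List.mem_singleton] at hg; omega
    · intro x g' hx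
      rw [insertAll_get? triple comp n x] at hx
      split_ifs at hx with ht
      · cases hx
        exact List.mem_append_right _ (by simp)
      · exact List.mem_append_left _ (hCov x g' hx)
    · apply List.rel_append
      · refine forall₂_imp_mem hF ?_
        intro grp g hgrp hg hR
        refine ⟨hR.1, hR.2.1, fun x => ?_⟩
        rw [insertAll_get? triple comp n x]
        by_cases hx3 : x ∈ triple
        · rw [if_pos hx3]
          apply iff_of_false
          · intro hxg
            exact (PySem.Set.isdisjoint_iff _ _).mp (hall grp hgrp) x ((hmemV x).mpr hx3) hxg
          · intro hc
            have : n = g := Option.some.inj hc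
            have := hBnd g hg
            omega
        · rw [if_neg hx3]
          exact hR.2.2 x
      · refine List.Forall₂.cons ⟨PySem.Set.nodup_ofList _, ?_, ?_⟩ List.Forall₂.nil
        · exact List.ne_nil_of_mem ((hmemV (pvB_f n)).mpr (List.mem_cons_self))
        · intro x
          rw [insertAll_get? triple comp n x]
          by_cases hx3 : x ∈ triple
          · rw [if_pos hx3]
            exact iff_of_true ((hmemV x).mpr hx3) rfl
          · rw [if_neg hx3]
            apply iff_of_false (fun hx => hx3 ((hmemV x).mp hx))
            intro hc
            have := hBnd n (hCov x n hc)
            omega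
  · -- merge case
    subst hvg
    obtain ⟨glp, gk, gls, hglsplit, hpreF, hkR, hsufF⟩ := forall₂_split pre hF
    subst hglsplit
    set I : PySem.Set Int := bIds comp triple with hI
    have hgkI : gk ∈ I := (matched_iff comp triple hkR.2.2).mp hgA
    have hIne : I ≠ [] := List.ne_nil_of_mem hgkI
    have hglpI : ∀ g ∈ glp, g ∉ I := by
      intro g hg hgI
      obtain ⟨a, ha, haR⟩ := forall₂_mem_right hpreF g hg
      have := (matched_iff comp triple haR.2.2).mpr hgI
      rw [hpre a ha] at this
      exact Bool.noConfusion this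
    have hIgl : ∀ g ∈ I, g ∈ glp ++ gk :: gls := by
      intro g hg
      obtain ⟨v, hv, hgv⟩ := (mem_bIds comp triple g).mp hg
      exact hCov v g hgv
    rw [List.pairwise_append] at hPW
    obtain ⟨hPWp, hPW2, hPWc⟩ := hPW
    have hgkls : ∀ b ∈ gls, gk < b := (List.pairwise_cons.mp hPW2).1
    have hmin := minD_spec I n hIne
    have ht : PySem.List.minD I (fun x => x) n = gk := by
      rcases List.mem_append.mp (hIgl _ hmin.1) with hm | hm
      · exact absurd hmin.1 (hglpI _ hm)
      · rcases List.mem_cons.mp hm with hm | hm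
        · exact hm
        · have h1 := hgkls _ hm
          have h2 := hmin.2 gk hgkI
          omega
    have hbs : bStepDict comp n = bInsertAll (bRelabel comp I gk) triple gk := by
      unfold bStepDict
      rw [← htriple, ← hI, ht]
    set comp₁ := bRelabel comp I gk with hcomp₁
    have hsing : ∀ w ∈ I, I.length ≤ 1 → w = gk := by
      intro w hw hlen
      obtain ⟨a, ha⟩ := List.length_eq_one_iff.mp (show I.length = 1 by
        have := List.length_pos_of_mem hgkI
        omega)
      rw [ha] at hw hgkI
      rw [List.mem_singleton] at hw hgkI
      rw [hw, hgkI]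
    have hg1 : ∀ x, comp₁.get? x
        = (comp.get? x).map (fun w => if PySem.Set.contains I w = true then gk else w) :=
      fun x => bRelabel_get? comp I gk hK hsing x
    have hget' : ∀ x, (bStepDict comp n).get? x
        = if x ∈ triple then some gk else comp₁.get? x := by
      intro x
      rw [hbs]
      exact insertAll_get? triple comp₁ gk x
    obtain ⟨U, hUeq, hUnd, hUmem⟩ := aSide V pre suf gA hkR.1 hpre hgA
    rw [hUeq]
    -- preserved pairs: colour not merged, group untouched
    have hkeep : ∀ (grp : PySem.Set Int) (g : Int), InvR comp grp g → g ∉ I → g ≠ gk →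
        PySem.Set.isdisjoint V grp = true → InvR (bStepDict comp n) grp g := by
      intro grp g hR hgI hgk hdj
      refine ⟨hR.1, hR.2.1, fun x => ?_⟩
      rw [hget' x]
      by_cases hx3 : x ∈ triple
      · rw [if_pos hx3]
        apply iff_of_false
        · intro hxg
          exact (PySem.Set.isdisjoint_iff _ _).mp hdj x ((hmemV x).mpr hx3) hxg
        · intro hc
          exact hgk (Option.some.inj hc).symm
      · rw [if_neg hx3, hg1 x]
        cases hc : comp.get? x with
        | none =>
          apply iff_of_false
          · intro hxg
            rw [(hR.2.2 x).mp hxg] at hc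
            simp at hc
          · intro hfc
            simp at hfc
        | some w =>
          simp only [Option.map_some]
          by_cases hw : PySem.Set.contains I w = true
          · rw [if_pos hw]
            apply iff_of_false
            · intro hxg
              have : w = g := Option.some.inj ((hR.2.2 x).mp hxg ▸ hc).symm
              subst this
              exact hgI ((PySem.Set.contains_iff I w).mp hw)
            · intro hcc
              exact hgk (Option.some.inj hcc).symm
          · rw [if_neg hw, hR.2.2 x, hc]
    refine ⟨glp ++ gk :: gls.filter (fun g => !(PySem.Set.contains I g)), ?_, ?_, ?_, ?_, ?_⟩
    · -- keys nodup
      rw [hbs]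
      apply insertAll_keys_nodup
      rw [hcomp₁, bRelabel_keys]
      exact hK
    · -- pairwise
      have hsub : (glp ++ gk :: gls.filter (fun g => !(PySem.Set.contains I g))).Sublist
          (glp ++ gk :: gls) :=
        List.Sublist.append_left ((List.filter_sublist (l := gls)).cons₂ gk) glp
      exact (List.pairwise_append.mpr ⟨hPWp, hPW2, hPWc⟩).sublist hsub
    · -- bound
      intro g hg
      have hsub : (glp ++ gk :: gls.filter (fun g => !(PySem.Set.contains I g))).Sublist
          (glp ++ gk :: gls) :=
        List.Sublist.append_left ((List.filter_sublist (l := gls)).cons₂ gk) glp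
      have := hBnd g (hsub.subset hg)
      omega
    · -- cover
      intro x g' hx
      rw [hget' x] at hx
      split_ifs at hx with hx3
      · cases hx
        exact List.mem_append_right _ List.mem_cons_self
      · rw [hg1 x] at hx
        cases hc : comp.get? x with
        | none => rw [hc] at hx; simp at hx
        | some w =>
          rw [hc] at hx
          simp only [Option.map_some] at hx
          by_cases hw : PySem.Set.contains I w = true
          · rw [if_pos hw] at hx
            cases hx
            exact List.mem_append_right _ List.mem_cons_self
          · rw [if_neg hw] at hx
            cases hx
            rcases List.mem_append.mp (hCov x g' hc) with hm | hm
            · exact List.mem_append_left _ hm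
            · rcases List.mem_cons.mp hm with hm | hm
              · subst hm
                exact absurd ((PySem.Set.contains_iff I g').mpr hgkI) hw
              · refine List.mem_append_right _ (List.mem_cons_of_mem _ ?_)
                rw [List.mem_filter]
                refine ⟨hm, ?_⟩
                cases hcb : PySem.Set.contains I g' with
                | true => exact absurd hcb hw
                | false => rfl
    · -- Forall₂
      apply List.rel_append
      · refine forall₂_imp_mem hpreF ?_
        intro a b ha hb hR
        exact hkeep a b hR (hglpI b hb) (fun hbk => by
          have := hPWc b hb gk List.mem_cons_self
          omega) (hpre a ha)
      · refine List.Forall₂.cons ?_ ?_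
        · -- merged group
          refine ⟨hUnd, ?_, ?_⟩
          · exact List.ne_nil_of_mem
              ((hUmem (pvB_f n)).mpr (Or.inl (Or.inr ((hmemV _).mpr List.mem_cons_self))))
          · intro x
            rw [hget' x, hUmem x]
            by_cases hx3 : x ∈ triple
            · rw [if_pos hx3]
              exact iff_of_true (Or.inl (Or.inr ((hmemV x).mpr hx3))) rfl
            · rw [if_neg hx3, hg1 x]
              cases hc : comp.get? x with
              | none =>
                apply iff_of_false
                · rintro ((hxa | hxv) | ⟨g0, hg0, _, hxg0⟩)
                  · rw [(hkR.2.2 x).mp hxa] at hc; simp at hc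
                  · exact hx3 ((hmemV x).mp hxv)
                  · obtain ⟨b0, hb0, hb0R⟩ := forall₂_mem_left hsufF g0 hg0
                    rw [(hb0R.2.2 x).mp hxg0] at hc
                    simp at hc
                · intro hfc
                  simp at hfc
              | some w =>
                simp only [Option.map_some]
                by_cases hw : PySem.Set.contains I w = true
                · rw [if_pos hw]
                  apply iff_of_true _ rfl
                  have hwI : w ∈ I := (PySem.Set.contains_iff I w).mp hw
                  rcases List.mem_append.mp (hIgl w hwI) with hm | hm
                  · exact absurd hwI (hglpI w hm)
                  · rcases List.mem_cons.mp hm with hm | hm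
                    · subst hm
                      exact Or.inl (Or.inl ((hkR.2.2 x).mpr hc))
                    · obtain ⟨a0, ha0, ha0R⟩ := forall₂_mem_right hsufF w hm
                      exact Or.inr ⟨a0, ha0, (matched_iff comp triple ha0R.2.2).mpr hwI,
                        (ha0R.2.2 x).mpr hc⟩
                · rw [if_neg hw]
                  apply iff_of_false
                  · rintro ((hxa | hxv) | ⟨g0, hg0, hg0m, hxg0⟩)
                    · have : w = gk := Option.some.inj ((hkR.2.2 x).mp hxa ▸ hc).symm
                      subst this
                      exact hw ((PySem.Set.contains_iff I w).mpr hgkI)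
                    · exact hx3 ((hmemV x).mp hxv)
                    · obtain ⟨b0, hb0, hb0R⟩ := forall₂_mem_left hsufF g0 hg0
                      have : w = b0 := Option.some.inj ((hb0R.2.2 x).mp hxg0 ▸ hc).symm
                      subst this
                      exact hw ((PySem.Set.contains_iff I w).mpr
                        ((matched_iff comp triple hb0R.2.2).mp hg0m))
                  · intro hcc
                    have : w = gk := Option.some.inj hcc
                    subst this
                    exact hw ((PySem.Set.contains_iff I w).mpr hgkI)
        · -- untouched suffix
          have hsufF' := forall₂_filter₂ (fun g => PySem.Set.isdisjoint V g)
            (fun g => !(PySem.Set.contains I g)) hsufF (by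
              intro a b hR
              show PySem.Set.isdisjoint V a = !(PySem.Set.contains I b)
              cases hb : PySem.Set.contains I b with
              | true =>
                have hmd := (matched_iff comp triple hR.2.2).mpr ((PySem.Set.contains_iff I b).mp hb)
                rw [hV, hmd]
                rfl
              | false =>
                cases hd : PySem.Set.isdisjoint V a with
                | true => rfl
                | false =>
                  have := (matched_iff comp triple hR.2.2).mp hd
                  rw [(PySem.Set.contains_iff I b).mpr this] at hb
                  exact Bool.noConfusion hb)
          refine forall₂_imp_mem hsufF' ?_
          intro a b ha hb hR
          have hbI : b ∉ I := by
            have := (List.mem_filter.mp hb).2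
            rw [Bool.not_eq_true'] at this
            intro hm
            rw [(PySem.Set.contains_iff I b).mpr hm] at this
            exact Bool.noConfusion this
          have hbgk : b ≠ gk := by
            have := hgkls b (List.mem_of_mem_filter hb)
            omega
          exact hkeep a b hR hbI hbgk (List.mem_filter.mp ha).2

-- the loop: invariant + identical accumulators
lemma loop_inv :
    ∀ (k : Nat) (a : Int) (stA : List (PySem.Set Int) × List Int × List (List (List Int)))
      (stB : PySem.Dict Int Int × List Int × List (List (List Int))) (gl : List Int),
      InvAB a stA.1 stB.1 gl → stA.2 = stB.2 →
      ((PySem.List.pyRange a (a + (k : Int))).foldl cvgA_step stA).2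
        = ((PySem.List.pyRange a (a + (k : Int))).foldl cvgB_step stB).2 := by
  intro k
  induction k with
  | zero =>
    intro a stA stB gl _ h2
    have hnil : PySem.List.pyRange a (a + ((0 : Nat) : Int)) = [] := by
      simp [PySem.List.pyRange]
    rw [hnil]
    exact h2
  | succ k ih =>
    intro a stA stB gl hInv h2
    have hlt : a < a + ((k + 1 : Nat) : Int) := by push_cast; omega
    rw [PySem.List.pyRange_one_cons hlt, List.foldl_cons, List.foldl_cons]
    obtain ⟨gl', hInv'⟩ := step_inv a stA.1 stB.1 gl hInv
    have hstB1 : (cvgB_step stB a).1 = bStepDict stB.1 a := rfl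
    have hInv'' : InvAB (a + 1) (cvgA_step stA a).1 (cvgB_step stB a).1 gl' := by
      rw [cvgA_step_eq, hstB1]
      exact hInv'
    have hgids : bGids (bStepDict stB.1 a) = gl' := gids_eq (a + 1) _ _ _ hInv''
    have hlen : (aGroups stA.1 (PySem.Set.ofList [pv_f a, pv_g a, pv_h a])).length
        = gl'.length := by
      have := hInv''.2.2.2.2
      rw [cvgA_step_eq] at this
      exact this.length_eq
    have hsnap' := snap_eq (a + 1) (cvgA_step stA a).1 (cvgB_step stB a).1 gl' hInv''
    have hA1 : (cvgA_step stA a).1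
        = aGroups stA.1 (PySem.Set.ofList [pv_f a, pv_g a, pv_h a]) := rfl
    rw [hstB1, hA1] at hsnap'
    have c1 : (cvgA_step stA a).2.1 = (cvgB_step stB a).2.1 := by
      show stA.2.1 ++ [((aGroups stA.1 (PySem.Set.ofList [pv_f a, pv_g a, pv_h a])).length : Int)]
        = stB.2.1 ++ [((bGids (bStepDict stB.1 a)).length : Int)]
      rw [h2, hlen, hgids]
    have c2 : (cvgA_step stA a).2.2 = (cvgB_step stB a).2.2 := by
      show stA.2.2 ++ [(aGroups stA.1 (PySem.Set.ofList [pv_f a, pv_g a, pv_h a])).map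
          (fun grp => PySem.List.sorted grp (fun x => x) false)]
        = stB.2.2 ++ [(bGids (bStepDict stB.1 a)).map
          (fun gid => PySem.List.sorted ((bBuckets (bStepDict stB.1 a)).getD gid [])
            (fun x => x) false)]
      rw [h2, hsnap']
    have h2' : (cvgA_step stA a).2 = (cvgB_step stB a).2 := Prod.ext c1 c2
    have hrange : a + ((k + 1 : Nat) : Int) = (a + 1) + ((k : Nat) : Int) := by
      push_cast; omega
    rw [hrange]
    exact ih (a + 1) (cvgA_step stA a) (cvgB_step stB a) gl' hInv'' h2'

lemma inv_init : InvAB 1 [] PySem.Dict.empty [] := by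
  refine ⟨PySem.Dict.nodup_keys_empty, List.Pairwise.nil, by simp, ?_, List.Forall₂.nil⟩
  intro x g' hx
  rw [PySem.Dict.get?_empty] at hx
  simp at hx

-- ===== VERDICT (by name: the statement is the Claim_ definition above) =====
theorem calculate_value_groups_spec : Claim_equal_calculate_value_groups := by
  intro max_n _
  unfold Spec_calculate_value_groups calculate_value_groups calculate_value_groups_alt
  by_cases h0 : 0 ≤ max_n
  · have hrw : max_n + 1 = 1 + (max_n.toNat : Int) := by omega
    have h := loop_inv max_n.toNat 1 ([], [], []) (PySem.Dict.empty, [], []) [] inv_init rfl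
    rw [← hrw] at h
    show (((PySem.List.pyRange 1 (max_n + 1)).foldl cvgA_step ([], [], [])).2.1,
          ((PySem.List.pyRange 1 (max_n + 1)).foldl cvgA_step ([], [], [])).2.2) = _
    rw [h]
  · have hnil : PySem.List.pyRange 1 (max_n + 1) = [] := by
      simp [PySem.List.pyRange]
      omega
    rw [hnil]
    rfl
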